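-- pv_equiv track=rewrite | github.com/samgh/CIMDynamicProgramming | python/array_combination.py | top_down_combos_helper
-- ===== SOURCE A (Python) =====
-- from typing import List
--
-- def top_down_combos_helper(arr: List[int], i: int, dp: List[int]):
--     """Top-down solution helper."""
--     if len(arr) == i:
--         return 1
--     if dp[i] == 0:
--         include = top_down_combos_helper(arr, i+1, dp)
--         exclude = top_down_combos_helper(arr, i+1, dp)
--         dp[i] = include + exclude
--     return dp[i]
-- ===== SOURCE B (Python) =====
-- def top_down_combos_helper(arr, i, dp):
--     """Bottom-up: fill the memo table backward from the end of arr."""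
--     combos = 1
--     for j in reversed(range(i, len(arr))):
--         if dp[j] == 0:
--             dp[j] = 2 * combos
--         combos = dp[j]
--     return combos
-- ===== Notes on version B (the rewrite author's own statement) =====
-- stated objective: alternative
-- what changed: Replaces A's double recursion over the suffix by the standard bottom-up rewrite: a single backward loop that fills the memo table from the end of arr; Pre_ restricts to the natural domain 0 <= i <= len(arr) with dp covering indices i..len(arr)-1 (outside it A's returns are negative-index-wraparound artefacts or reads from a table too short to memoize the whole suffix, where B raises).
-- outside the precondition, e.g. on top_down_combos_helper([1, 2], 0, [5]): A returns 5, B raises IndexError; on top_down_combos_helper([1, 2], -2, [0, 0]): A returns 16, B returns 4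
import Mathlib
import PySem

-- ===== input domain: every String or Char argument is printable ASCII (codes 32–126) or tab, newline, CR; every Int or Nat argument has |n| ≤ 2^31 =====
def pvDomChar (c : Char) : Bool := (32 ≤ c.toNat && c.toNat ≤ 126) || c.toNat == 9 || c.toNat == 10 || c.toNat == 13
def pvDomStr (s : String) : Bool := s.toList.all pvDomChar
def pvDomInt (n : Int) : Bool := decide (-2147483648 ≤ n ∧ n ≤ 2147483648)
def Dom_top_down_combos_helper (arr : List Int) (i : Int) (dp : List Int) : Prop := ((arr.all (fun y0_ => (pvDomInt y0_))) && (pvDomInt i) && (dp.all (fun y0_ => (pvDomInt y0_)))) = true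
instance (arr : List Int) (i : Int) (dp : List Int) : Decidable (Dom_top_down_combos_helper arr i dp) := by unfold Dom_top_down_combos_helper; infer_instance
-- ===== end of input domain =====

-- B replaces A's double recursion over the suffix by the standard bottom-up rewrite, a single
-- backward loop filling the memo table from the end of arr; equivalence is about the RETURN
-- value only (both mutate dp in Python, not identically: B also fills cells past the first
-- memoized entry).

-- ===== PORT A =====
-- Fuel-based transliteration of A's recursion; the recursion depth inside Pre_ is exactly
-- (len(arr) - i), so the fuel never runs out there.  pyGet? none = IndexError (outside Pre_);
-- the final `return dp[i]` re-reads the table after the write, as in Python.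
def pvGoA (n : Int) : Nat → Int → List Int → Int × List Int
  | 0, i, dp => if n == i then (1, dp) else (0, dp)   -- fuel exhausted: only outside Pre_
  | fuel + 1, i, dp =>
    if n == i then (1, dp)
    else
      match PySem.List.pyGet? dp i with
      | none => (0, dp)                                -- IndexError: outside Pre_
      | some v =>
        if v == 0 then
          let p1 := pvGoA n fuel (i + 1) dp            -- include = helper(arr, i+1, dp)
          let p2 := pvGoA n fuel (i + 1) p1.2          -- exclude = helper(arr, i+1, dp)
          let dp3 := PySem.List.pySetD p2.2 i (p1.1 + p2.1)   -- dp[i] = include + exclude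
          ((PySem.List.pyGet? dp3 i).getD 0, dp3)      -- return dp[i]
        else (v, dp)

def top_down_combos_helper (arr : List Int) (i : Int) (dp : List Int) : Int :=
  (pvGoA arr.length ((arr.length - i).toNat) i dp).1

-- ===== PORT B =====
-- Transliteration of Source B's loop body for one index j: `if dp[j] == 0: dp[j] = 2*combos`,
-- then `combos = dp[j]`; state = (combos, dp).
def pvStepB (s : Int × List Int) (j : Int) : Int × List Int :=
  match PySem.List.pyGet? s.2 j with
  | none => s                                          -- IndexError: outside Pre_
  | some v =>
    if v == 0 then (2 * s.1, PySem.List.pySetD s.2 j (2 * s.1))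
    else (v, s.2)

-- for j in reversed(range(i, len(arr))): … ; return combos
def top_down_combos_helper_alt (arr : List Int) (i : Int) (dp : List Int) : Int :=
  (((PySem.List.pyRange i arr.length 1).reverse).foldl pvStepB (1, dp)).1

-- ===== PRECONDITION & SPEC =====
-- Pre_ restricts to the natural domain 0 ≤ i ≤ len(arr) with dp covering indices
-- i..len(arr)-1; outside it A's returns are negative-index-wraparound artefacts or values
-- read from a table too short to memoize the whole suffix (where B raises IndexError).
def Pre_top_down_combos_helper (arr : List Int) (i : Int) (dp : List Int) : Prop :=
  0 ≤ i ∧ i ≤ (arr.length : Int) ∧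
    (i < (arr.length : Int) → (arr.length : Int) ≤ (dp.length : Int))
instance (arr : List Int) (i : Int) (dp : List Int) : Decidable (Pre_top_down_combos_helper arr i dp) := by
  unfold Pre_top_down_combos_helper; infer_instance

def pvWitness_top_down_combos_helper : List Int × Int × List Int := ([1, 2], 0, [0, 0])

def Spec_top_down_combos_helper (arr : List Int) (i : Int) (dp : List Int) (out : Int) : Prop := out = top_down_combos_helper_alt arr i dp
instance (arr : List Int) (i : Int) (dp : List Int) (out : Int) : Decidable (Spec_top_down_combos_helper arr i dp out) := by unfold Spec_top_down_combos_helper; infer_instance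

-- ===== CLAIM (what is proved, stated in full; the proofs are below) =====
def Claim_equal_top_down_combos_helper : Prop := ∀ (arr : List Int) (i : Int) (dp : List Int), Dom_top_down_combos_helper arr i dp → Pre_top_down_combos_helper arr i dp → Spec_top_down_combos_helper arr i dp (top_down_combos_helper arr i dp)

-- ===== LEMMAS AND PROOFS =====

-- Common value of both programs: scanning from i, the first memoized entry dp[j] contributes
-- dp[j] * 2^(j-i); with none, 2^(n-i).
def pvScan (dp : List Int) (n i : Int) : List Int → Int
  | [] => 2 ^ (n - i).toNat
  | j :: js =>
    match PySem.List.pyGet? dp j with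
    | none => 0
    | some v => if v == 0 then pvScan dp n i js else v * 2 ^ (j - i).toNat

-- Reading back the cell just written (possibly negative index, Python wraparound).
lemma pyGet?_pySetD_self (xs : List Int) (i v : Int)
    (h1 : -((xs.length : Int)) ≤ i) (h2 : i < (xs.length : Int)) :
    PySem.List.pyGet? (PySem.List.pySetD xs i v) i = some v := by
  unfold PySem.List.pyGet? PySem.List.pySetD PySem.List.pySet? PySem.List.pyIdx?
  by_cases ha : 0 ≤ i
  · rw [if_pos ha, if_pos h2]
    simp [ha, h2]
  · rw [if_neg ha, if_pos h1]
    simp [ha, h1, List.getElem?_set_self (show xs.length - (-i).toNat < xs.length by omega)]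

-- Writing at i does not change a read at a different nonnegative index j.
lemma pyGet?_pySetD_ne (xs : List Int) (i j v : Int)
    (hi : 0 ≤ i) (hj : 0 ≤ j) (hne : j ≠ i) :
    PySem.List.pyGet? (PySem.List.pySetD xs i v) j = PySem.List.pyGet? xs j := by
  rw [PySem.List.pySetD_of_nonneg xs v hi]
  unfold PySem.List.pyGet? PySem.List.pyIdx?
  simp only [List.length_set]
  by_cases h : j < (xs.length : Int)
  · simp [hj, h, List.getElem_set_ne (show i.toNat ≠ j.toNat by omega)]
  · simp [hj, h]

lemma length_pySetD' (xs : List Int) (i v : Int) :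
    (PySem.List.pySetD xs i v).length = xs.length := by
  unfold PySem.List.pySetD PySem.List.pySet?
  cases h : PySem.List.pyIdx? xs.length i <;> simp

-- Shifting the reference index of the scan multiplies the result by 2.
lemma pvScan_shift (dp : List Int) (n i : Int) (js : List Int)
    (hmem : ∀ j ∈ js, i + 1 ≤ j) (hn : i + 1 ≤ n) :
    pvScan dp n i js = 2 * pvScan dp n (i + 1) js := by
  induction js with
  | nil =>
    simp only [pvScan]
    have : (n - i).toNat = (n - (i + 1)).toNat + 1 := by omega
    rw [this, pow_succ]; ring
  | cons j js ih =>
    simp only [pvScan]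
    cases h : PySem.List.pyGet? dp j with
    | none => simp
    | some v =>
      by_cases hv : v = 0
      · simpa [hv] using ih (fun x hx => hmem x (by simp [hx]))
      · have hj : i + 1 ≤ j := hmem j (by simp)
        have : (j - i).toNat = (j - (i + 1)).toNat + 1 := by omega
        simp only [hv, beq_iff_eq, if_false]
        rw [this, pow_succ]; ring

-- Main invariant for A: with enough fuel and every actually-read cell in range, A's recursion
-- returns the scan value, the value is nonzero, the table keeps its length, and (for i < n)
-- cell i afterwards holds the value.
lemma pvGoA_spec (n : Int) : ∀ (fuel : Nat) (i : Int) (dp : List Int),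
    i + (fuel : Int) = n →
    (∀ j ∈ PySem.List.pyRange i n 1,
      (∀ k ∈ PySem.List.pyRange i j 1, PySem.List.pyGet? dp k = some 0) →
      PySem.Raise.InRange dp.length j) →
    (pvGoA n fuel i dp).1 = pvScan dp n i (PySem.List.pyRange i n 1) ∧
    (pvGoA n fuel i dp).1 ≠ 0 ∧
    (pvGoA n fuel i dp).2.length = dp.length ∧
    (i < n → PySem.List.pyGet? (pvGoA n fuel i dp).2 i = some (pvGoA n fuel i dp).1) := by
  intro fuel
  induction fuel with
  | zero =>
    intro i dp hfe _
    have hi : i = n := by omega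
    subst hi
    simp [pvGoA, pvScan, PySem.List.pyRange_one_eq_nil (le_refl i)]
  | succ fuel ih =>
    intro i dp hfe HE
    have hlt : i < n := by push_cast at hfe; omega
    have hne : (n == i) = false := by simp; omega
    have hinr : PySem.Raise.InRange dp.length i := by
      refine HE i (PySem.List.mem_pyRange_one.mpr ⟨le_refl i, hlt⟩) ?_
      intro k hk
      rw [PySem.List.mem_pyRange_one] at hk
      exact absurd hk (by omega)
    obtain ⟨hlo, hhi⟩ := hinr
    cases hget : PySem.List.pyGet? dp i with
    | none =>
      exfalso
      rw [PySem.List.pyGet?_eq_none_iff] at hget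
      exact hget ⟨hlo, hhi⟩
    | some v =>
      by_cases hv : v = 0
      · -- memoised value absent: A recurses twice, the scan moves on
        subst hv
        have hfe1 : (i + 1) + (fuel : Int) = n := by push_cast at hfe ⊢; omega
        have HE1 : ∀ j ∈ PySem.List.pyRange (i + 1) n 1,
            (∀ k ∈ PySem.List.pyRange (i + 1) j 1, PySem.List.pyGet? dp k = some 0) →
            PySem.Raise.InRange dp.length j := by
          intro j hj hz
          rw [PySem.List.mem_pyRange_one] at hj
          refine HE j (PySem.List.mem_pyRange_one.mpr ⟨by omega, hj.2⟩) ?_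
          intro k hk
          rw [PySem.List.mem_pyRange_one] at hk
          by_cases hki : k = i
          · subst hki; exact hget
          · exact hz k (PySem.List.mem_pyRange_one.mpr ⟨by omega, hk.2⟩)
        obtain ⟨hB1, hnz1, hlen1, hget1⟩ := ih (i + 1) dp hfe1 HE1
        have HE2 : ∀ j ∈ PySem.List.pyRange (i + 1) n 1,
            (∀ k ∈ PySem.List.pyRange (i + 1) j 1,
              PySem.List.pyGet? (pvGoA n fuel (i + 1) dp).2 k = some 0) →
            PySem.Raise.InRange (pvGoA n fuel (i + 1) dp).2.length j := by
          intro j hj hz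
          rw [PySem.List.mem_pyRange_one] at hj
          rw [hlen1]
          by_cases hj1 : j = i + 1
          · subst hj1
            refine HE1 _ (PySem.List.mem_pyRange_one.mpr ⟨le_refl _, hj.2⟩) ?_
            intro k hk
            rw [PySem.List.mem_pyRange_one] at hk
            exact absurd hk (by omega)
          · exfalso
            have h1n : i + 1 < n := by omega
            have h0 : some (pvGoA n fuel (i + 1) dp).1 = some 0 := by
              rw [← hget1 h1n]
              exact hz (i + 1) (PySem.List.mem_pyRange_one.mpr ⟨le_refl _, by omega⟩)
            exact hnz1 (Option.some.inj h0)
        obtain ⟨hB2, hnz2, hlen2, hget2⟩ := ih (i + 1) (pvGoA n fuel (i + 1) dp).2 hfe1 HE2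
        -- the second (exclude) call returns the same value as the first (include) call
        have hexc : (pvGoA n fuel (i + 1) (pvGoA n fuel (i + 1) dp).2).1
            = (pvGoA n fuel (i + 1) dp).1 := by
          by_cases hi1 : i + 1 < n
          · rw [hB2, PySem.List.pyRange_one_cons hi1]
            simp only [pvScan, hget1 hi1]
            simp [hnz1]
          · have hn1 : i + 1 = n := by omega
            rw [hB2, hB1, hn1, PySem.List.pyRange_one_eq_nil (le_refl n)]
            rfl
        -- the scan value at i is twice the scan value at i+1
        have hBstep : pvScan dp n i (PySem.List.pyRange i n 1)
            = 2 * (pvGoA n fuel (i + 1) dp).1 := by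
          rw [PySem.List.pyRange_one_cons hlt]
          simp only [pvScan, hget, BEq.rfl, if_true]
          rw [pvScan_shift dp n i _ (fun j hj => (PySem.List.mem_pyRange_one.mp hj).1)
            (by omega), ← hB1]
        have hlen2' : (pvGoA n fuel (i + 1) (pvGoA n fuel (i + 1) dp).2).2.length
            = dp.length := by rw [hlen2, hlen1]
        have hset : PySem.List.pyGet?
            (PySem.List.pySetD (pvGoA n fuel (i + 1) (pvGoA n fuel (i + 1) dp).2).2 i
              ((pvGoA n fuel (i + 1) dp).1
                + (pvGoA n fuel (i + 1) (pvGoA n fuel (i + 1) dp).2).1)) i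
            = some ((pvGoA n fuel (i + 1) dp).1
                + (pvGoA n fuel (i + 1) (pvGoA n fuel (i + 1) dp).2).1) := by
          exact pyGet?_pySetD_self _ i _ (by rw [hlen2']; exact hlo) (by rw [hlen2']; exact hhi)
        simp only [pvGoA, hne, Bool.false_eq_true, if_false, hget, BEq.rfl, if_true]
        refine ⟨?_, ?_, ?_, fun _ => ?_⟩
        · rw [hset]
          simp only [Option.getD_some, hexc, hBstep]; ring
        · rw [hset]
          simp only [Option.getD_some, hexc]
          have : (pvGoA n fuel (i + 1) dp).1 + (pvGoA n fuel (i + 1) dp).1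
              = 2 * (pvGoA n fuel (i + 1) dp).1 := by ring
          rw [this]
          exact mul_ne_zero two_ne_zero hnz1
        · rw [length_pySetD', hlen2']
        · rw [hset]
          simp [hexc]
      · -- memoised value present: both return it immediately
        have hvb : (v == 0) = false := by simp [hv]
        refine ⟨?_, ?_, ?_, fun _ => ?_⟩
        · simp only [pvGoA, hne, Bool.false_eq_true, if_false, hget, hvb]
          rw [PySem.List.pyRange_one_cons hlt]
          simp [pvScan, hget, hvb]
        · simp only [pvGoA, hne, Bool.false_eq_true, if_false, hget, hvb]
          exact hv
        · simp [pvGoA, hne, hget, hvb]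
        · simp only [pvGoA, hne, Bool.false_eq_true, if_false, hget, hvb]

-- Main invariant for B: the backward fold over [i, n) (processed right to left) returns the
-- scan value, keeps the table's length, and leaves every cell below i unchanged.
lemma pvFoldB_spec (n : Int) : ∀ (k : Nat) (i : Int) (dp : List Int),
    0 ≤ i → i + (k : Int) = n → n ≤ (dp.length : Int) →
    (((PySem.List.pyRange i n 1).reverse).foldl pvStepB (1, dp)).1
        = pvScan dp n i (PySem.List.pyRange i n 1) ∧
    (((PySem.List.pyRange i n 1).reverse).foldl pvStepB (1, dp)).2.length = dp.length ∧
    (∀ j : Int, 0 ≤ j → j < i →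
      PySem.List.pyGet? (((PySem.List.pyRange i n 1).reverse).foldl pvStepB (1, dp)).2 j
        = PySem.List.pyGet? dp j) := by
  intro k
  induction k with
  | zero =>
    intro i dp _ hfe _
    have hi : i = n := by omega
    subst hi
    simp [pvScan, PySem.List.pyRange_one_eq_nil (le_refl i)]
  | succ k ih =>
    intro i dp h0 hfe hlen
    have hlt : i < n := by push_cast at hfe; omega
    have hfe1 : (i + 1) + (k : Int) = n := by push_cast at hfe ⊢; omega
    obtain ⟨ih1, ih2, ih3⟩ := ih (i + 1) dp (by omega) hfe1 hlen
    set r := ((PySem.List.pyRange (i + 1) n 1).reverse).foldl pvStepB (1, dp) with hr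
    have hsplit : (((PySem.List.pyRange i n 1).reverse).foldl pvStepB (1, dp)) = pvStepB r i := by
      rw [PySem.List.pyRange_one_cons hlt]
      simp [List.foldl_append, hr]
    have hread : PySem.List.pyGet? r.2 i = PySem.List.pyGet? dp i := ih3 i h0 (by omega)
    cases hget : PySem.List.pyGet? dp i with
    | none =>
      exfalso
      rw [PySem.List.pyGet?_eq_none_iff] at hget
      exact hget ⟨by omega, by omega⟩
    | some v =>
      by_cases hv : v = 0
      · subst hv
        have hstep : pvStepB r i = (2 * r.1, PySem.List.pySetD r.2 i (2 * r.1)) := by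
          simp [pvStepB, hread, hget]
        refine ⟨?_, ?_, ?_⟩
        · rw [hsplit, hstep, PySem.List.pyRange_one_cons hlt]
          simp only [pvScan, hget, BEq.rfl, if_true]
          rw [pvScan_shift dp n i _ (fun j hj => (PySem.List.mem_pyRange_one.mp hj).1)
            (by omega), ← ih1]
        · rw [hsplit, hstep]
          simp [ih2]
        · intro j hj hji
          rw [hsplit, hstep]
          simp only
          rw [pyGet?_pySetD_ne r.2 i j _ h0 hj (by omega)]
          exact ih3 j hj (by omega)
      · have hstep : pvStepB r i = (v, r.2) := by
          simp [pvStepB, hread, hget, hv]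
        refine ⟨?_, ?_, ?_⟩
        · rw [hsplit, hstep, PySem.List.pyRange_one_cons hlt]
          simp [pvScan, hget, hv]
        · rw [hsplit, hstep]; exact ih2
        · intro j hj hji
          rw [hsplit, hstep]
          exact ih3 j hj (by omega)

-- ===== VERDICT (by name: the statement is the Claim_ definition above) =====
theorem top_down_combos_helper_spec : Claim_equal_top_down_combos_helper := by
  intro arr i dp _ hpre
  obtain ⟨h0, h1, h2⟩ := hpre
  unfold Spec_top_down_combos_helper top_down_combos_helper top_down_combos_helper_alt
  by_cases hin : i < (arr.length : Int)
  · have hlen := h2 hin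
    have HE : ∀ j ∈ PySem.List.pyRange i (arr.length : Int) 1,
        (∀ k ∈ PySem.List.pyRange i j 1, PySem.List.pyGet? dp k = some 0) →
        PySem.Raise.InRange dp.length j := by
      intro j hj _
      rw [PySem.List.mem_pyRange_one] at hj
      exact ⟨by omega, by omega⟩
    have hfuel : i + ((((arr.length : Int) - i).toNat : Nat) : Int) = (arr.length : Int) := by
      omega
    have hA := (pvGoA_spec (arr.length) _ i dp hfuel HE).1
    have hB := (pvFoldB_spec (arr.length) (((arr.length : Int) - i).toNat) i dp h0 hfuel hlen).1
    rw [hA, hB]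
  · have hi : i = (arr.length : Int) := by omega
    have hz : ((arr.length : Int) - i).toNat = 0 := by omega
    rw [hz, hi, PySem.List.pyRange_one_eq_nil (le_refl _)]
    simp [pvGoA]
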